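-- pv_equiv track=rewrite | github.com/recepcanaltinbag/picota | picota/src/long_read_checkIS26.py | is_circular_ordered
-- ===== SOURCE A (Python) =====
-- def is_circular_ordered(aligns, ref_len, transposon_len,
--                         cargo_start_win=500, cargo_end_win=500, tolerance=50):
--     aligns = sorted(aligns, key=lambda x: x[2])  # query sırasına göre
--     cargo_end_flag = False
--     transposon_flag = False
--     cargo_start_flag = False
--
--     for ref_start, ref_end, q_start, q_end in aligns:
--         # 1. Cargo sonu
--         if not cargo_end_flag and ref_end > ref_len - cargo_end_win:
--             cargo_end_flag = True
--             continue
--         # 2. Transposon (tam kapsama)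
--         if cargo_end_flag and not transposon_flag:
--             if ref_start <= 0 + tolerance and ref_end >= transposon_len - tolerance:
--                 transposon_flag = True
--                 continue
--         # 3. Cargo başı
--         if cargo_end_flag and transposon_flag and not cargo_start_flag:
--             if ref_start < cargo_start_win:
--                 cargo_start_flag = True
--
--     return cargo_end_flag and transposon_flag and cargo_start_flag
-- ===== SOURCE B (Python) =====
-- def is_circular_ordered(aligns, ref_len, transposon_len,
--                         cargo_start_win=500, cargo_end_win=500, tolerance=50):
--     # Existential reformulation: the arrangement is circular iff some alignment
--     # fully covers the transposon while an earlier one (in query order) reaches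
--     # the cargo end and a later one starts in the cargo-start window — an
--     # ordered-subsequence existence test (greedy staged matching succeeds iff
--     # such an ordered triple exists).
--     s = sorted(aligns, key=lambda a: a[2])
--     before, rest = [], s
--     while rest:
--         a, rest = rest[0], rest[1:]
--         if (a[0] <= tolerance and a[1] >= transposon_len - tolerance
--                 and any(b[1] > ref_len - cargo_end_win for b in before)
--                 and any(c[0] < cargo_start_win for c in rest)):
--             return True
--         before.append(a)
--     return False
-- ===== Notes on version B (the rewrite author's own statement) =====
-- stated objective: alternative
-- what changed: Replaced the three-flag greedy sweep with an ordered-subsequence existence test: for each candidate transposon-covering alignment it checks an earlier cargo-end hit and a later cargo-start hit, correct because greedy staged matching succeeds iff such an ordered triple exists.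
import Mathlib
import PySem

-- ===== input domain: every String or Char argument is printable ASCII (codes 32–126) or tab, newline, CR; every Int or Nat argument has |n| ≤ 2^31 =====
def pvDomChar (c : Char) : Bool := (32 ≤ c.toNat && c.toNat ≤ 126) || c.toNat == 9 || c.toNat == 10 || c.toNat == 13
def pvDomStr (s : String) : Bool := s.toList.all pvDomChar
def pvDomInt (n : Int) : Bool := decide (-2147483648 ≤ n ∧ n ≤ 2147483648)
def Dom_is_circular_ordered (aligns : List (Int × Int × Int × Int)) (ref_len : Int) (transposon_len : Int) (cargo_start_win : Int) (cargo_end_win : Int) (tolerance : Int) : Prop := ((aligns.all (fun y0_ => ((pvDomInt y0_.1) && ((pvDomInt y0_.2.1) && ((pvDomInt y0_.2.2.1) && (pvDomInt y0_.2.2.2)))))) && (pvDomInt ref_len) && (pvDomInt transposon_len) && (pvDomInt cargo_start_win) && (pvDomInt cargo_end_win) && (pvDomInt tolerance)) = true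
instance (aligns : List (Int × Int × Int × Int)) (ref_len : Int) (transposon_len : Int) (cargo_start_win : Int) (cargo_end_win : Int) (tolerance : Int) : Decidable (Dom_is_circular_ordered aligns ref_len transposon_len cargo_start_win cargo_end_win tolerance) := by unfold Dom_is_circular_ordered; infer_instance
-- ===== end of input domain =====

-- B replaces A's three-flag greedy sweep by an ordered-subsequence existence test
-- (for each candidate transposon alignment: an earlier cargo-end hit and a later
-- cargo-start hit); objective: a genuinely different algorithm of similar size.

-- ===== PORT A =====
-- the body of A's for-loop over the state (cargo_end_flag, transposon_flag, cargo_start_flag)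
def picotaStep (ref_len transposon_len cargo_start_win cargo_end_win tolerance : Int)
    (st : Bool × Bool × Bool) (x : Int × Int × Int × Int) : Bool × Bool × Bool :=
  let ce := st.1; let tr := st.2.1; let cs := st.2.2
  if ce = false ∧ x.2.1 > ref_len - cargo_end_win then (true, tr, cs)
  else if ce = true ∧ tr = false ∧ x.1 ≤ 0 + tolerance ∧ x.2.1 ≥ transposon_len - tolerance then (ce, true, cs)
  else if ce = true ∧ tr = true ∧ cs = false ∧ x.1 < cargo_start_win then (ce, tr, true)
  else st

def is_circular_ordered (aligns : List (Int × Int × Int × Int)) (ref_len : Int) (transposon_len : Int) (cargo_start_win : Int) (cargo_end_win : Int) (tolerance : Int) : Bool :=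
  let aligns' := PySem.List.sorted aligns (fun x => x.2.2.1)
  let st := aligns'.foldl (picotaStep ref_len transposon_len cargo_start_win cargo_end_win tolerance) (false, false, false)
  st.1 && st.2.1 && st.2.2

-- ===== PORT B =====
-- B's while-loop: `before` is the already-seen prefix, the argument list is `rest`
def altGo (ref_len transposon_len cargo_start_win cargo_end_win tolerance : Int)
    (before : List (Int × Int × Int × Int)) : List (Int × Int × Int × Int) → Bool
  | [] => false
  | a :: rest =>
    if a.1 ≤ tolerance ∧ a.2.1 ≥ transposon_len - tolerance
        ∧ before.any (fun b => decide (b.2.1 > ref_len - cargo_end_win))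
        ∧ rest.any (fun c => decide (c.1 < cargo_start_win)) then
      true
    else
      altGo ref_len transposon_len cargo_start_win cargo_end_win tolerance (before ++ [a]) rest

def is_circular_ordered_alt (aligns : List (Int × Int × Int × Int)) (ref_len : Int) (transposon_len : Int) (cargo_start_win : Int) (cargo_end_win : Int) (tolerance : Int) : Bool :=
  let s := PySem.List.sorted aligns (fun a => a.2.2.1)
  altGo ref_len transposon_len cargo_start_win cargo_end_win tolerance [] s

-- ===== PRECONDITION & SPEC =====
def Spec_is_circular_ordered (aligns : List (Int × Int × Int × Int)) (ref_len : Int) (transposon_len : Int) (cargo_start_win : Int) (cargo_end_win : Int) (tolerance : Int) (out : Bool) : Prop := out = is_circular_ordered_alt aligns ref_len transposon_len cargo_start_win cargo_end_win tolerance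
instance (aligns : List (Int × Int × Int × Int)) (ref_len : Int) (transposon_len : Int) (cargo_start_win : Int) (cargo_end_win : Int) (tolerance : Int) (out : Bool) : Decidable (Spec_is_circular_ordered aligns ref_len transposon_len cargo_start_win cargo_end_win tolerance out) := by unfold Spec_is_circular_ordered; infer_instance

-- ===== CLAIM (what is proved, stated in full; the proofs are below) =====
def Claim_equal_is_circular_ordered : Prop := ∀ (aligns : List (Int × Int × Int × Int)) (ref_len : Int) (transposon_len : Int) (cargo_start_win : Int) (cargo_end_win : Int) (tolerance : Int), Dom_is_circular_ordered aligns ref_len transposon_len cargo_start_win cargo_end_win tolerance → Spec_is_circular_ordered aligns ref_len transposon_len cargo_start_win cargo_end_win tolerance (is_circular_ordered aligns ref_len transposon_len cargo_start_win cargo_end_win tolerance)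

-- ===== LEMMAS AND PROOFS =====

-- proof-side notions: 'rest of the list past the first p-match', and the
-- existence of an ordered pair / triple of predicate matches as a subsequence
def searchPast {α : Type} (p : α → Bool) : List α → Option (List α)
  | [] => none
  | x :: xs => if p x then some xs else searchPast p xs

def exPair {α : Type} (q r : α → Bool) : List α → Bool
  | [] => false
  | y :: ys => (q y && ys.any r) || exPair q r ys

def exTriple {α : Type} (p q r : α → Bool) : List α → Bool
  | [] => false
  | x :: xs => (p x && exPair q r xs) || exTriple p q r xs

theorem exPair_imp_any {α : Type} (q r : α → Bool) (l : List α) (h : exPair q r l = true) :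
    l.any r = true := by
  induction l with
  | nil => simp [exPair] at h
  | cons y ys ih =>
    rcases (Bool.or_eq_true _ _).mp h with h' | h'
    · simp [List.any_cons, (Bool.and_eq_true _ _ |>.mp h').2]
    · simp [List.any_cons, ih h']

theorem exTriple_imp_exPair {α : Type} (p q r : α → Bool) (l : List α) (h : exTriple p q r l = true) :
    exPair q r l = true := by
  induction l with
  | nil => simp [exTriple] at h
  | cons x xs ih =>
    rcases (Bool.or_eq_true _ _).mp h with h' | h'
    · simp [exPair, (Bool.and_eq_true _ _ |>.mp h').2]
    · simp [exPair, ih h']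

theorem stage2_eq {α : Type} (q r : α → Bool) (l : List α) :
    (match searchPast q l with
     | none => false
     | some r2 => r2.any r) = exPair q r l := by
  induction l with
  | nil => rfl
  | cons y ys ih =>
    by_cases h : q y = true
    · rw [show searchPast q (y :: ys) = some ys from by simp [searchPast, h]]
      simp only [exPair]
      cases h2 : exPair q r ys
      · simp [h]
      · simp [h, exPair_imp_any q r ys h2]
    · simp only [searchPast, exPair, h]
      simpa [Bool.eq_false_iff.mpr h] using ih

theorem staged_eq {α : Type} (p q r : α → Bool) (l : List α) :
    (match searchPast p l with
     | none => false
     | some r1 => match searchPast q r1 with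
                  | none => false
                  | some r2 => r2.any r) = exTriple p q r l := by
  induction l with
  | nil => rfl
  | cons x xs ih =>
    by_cases h : p x = true
    · rw [show searchPast p (x :: xs) = some xs from by simp [searchPast, h]]
      rw [stage2_eq]
      simp only [exTriple]
      cases h3 : exTriple p q r xs
      · simp [h]
      · simp [h, exTriple_imp_exPair p q r xs h3]
    · simp only [searchPast, exTriple, h]
      simpa [Bool.eq_false_iff.mpr h] using ih

-- characterization of A's fold by stages
theorem fold_TTT (r t w v tol : Int) (l : List (Int × Int × Int × Int)) :
    l.foldl (picotaStep r t w v tol) (true, true, true) = (true, true, true) := by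
  induction l with
  | nil => rfl
  | cons x xs ih => simpa [picotaStep] using ih

theorem fold_TTF (r t w v tol : Int) (l : List (Int × Int × Int × Int)) :
    l.foldl (picotaStep r t w v tol) (true, true, false)
      = (true, true, l.any (fun x => decide (x.1 < w))) := by
  induction l with
  | nil => rfl
  | cons x xs ih =>
    by_cases h : x.1 < w
    · simp [picotaStep, h, fold_TTT]
    · simpa [picotaStep, h] using ih

theorem fold_TFF (r t w v tol : Int) (l : List (Int × Int × Int × Int)) :
    l.foldl (picotaStep r t w v tol) (true, false, false)
      = (match searchPast (fun x => decide (x.1 ≤ tol) && decide (x.2.1 ≥ t - tol)) l with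
         | none => (true, false, false)
         | some r2 => (true, true, r2.any (fun x => decide (x.1 < w)))) := by
  induction l with
  | nil => rfl
  | cons x xs ih =>
    by_cases h : x.1 ≤ tol ∧ x.2.1 ≥ t - tol
    · simp [picotaStep, searchPast, h.1, h.2, fold_TTF]
    · rw [Decidable.not_and_iff_not_or_not] at h
      rcases h with h | h
      · simpa [picotaStep, searchPast, h] using ih
      · by_cases h1 : x.1 ≤ tol
        · simpa [picotaStep, searchPast, h1, h] using ih
        · simpa [picotaStep, searchPast, h1, h] using ih

theorem fold_FFF (r t w v tol : Int) (l : List (Int × Int × Int × Int)) :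
    l.foldl (picotaStep r t w v tol) (false, false, false)
      = (match searchPast (fun x => decide (x.2.1 > r - v)) l with
         | none => (false, false, false)
         | some r1 => r1.foldl (picotaStep r t w v tol) (true, false, false)) := by
  induction l with
  | nil => rfl
  | cons x xs ih =>
    by_cases h : x.2.1 > r - v
    · simp [picotaStep, searchPast, h]
    · simpa [picotaStep, searchPast, h] using ih

-- characterization of B's loop: the prefix only matters through 'any p1'
theorem altGo_eq (r t w v tol : Int) (rest : List (Int × Int × Int × Int)) :
    ∀ before, altGo r t w v tol before rest
      = ((before.any (fun b => decide (b.2.1 > r - v))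
            && exPair (fun x => decide (x.1 ≤ tol) && decide (x.2.1 ≥ t - tol))
                      (fun c => decide (c.1 < w)) rest)
         || exTriple (fun b => decide (b.2.1 > r - v))
                     (fun x => decide (x.1 ≤ tol) && decide (x.2.1 ≥ t - tol))
                     (fun c => decide (c.1 < w)) rest) := by
  induction rest with
  | nil => intro before; simp [altGo, exPair, exTriple]
  | cons a rest' ih =>
    intro before
    simp only [altGo, ih (before ++ [a]), List.any_append, exPair, exTriple, List.any_cons]
    by_cases h1 : a.1 ≤ tol <;> by_cases h2 : a.2.1 ≥ t - tol <;>
      simp [h1, h2] <;>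
      cases before.any (fun b => decide (b.2.1 > r - v)) <;>
      cases hpa : decide (a.2.1 > r - v) <;> simp_all [Bool.or_assoc, Bool.or_self_left]

-- ===== VERDICT (by name: the statement is the Claim_ definition above) =====
theorem is_circular_ordered_spec : Claim_equal_is_circular_ordered := by
  intro aligns r t w v tol _
  unfold Spec_is_circular_ordered is_circular_ordered is_circular_ordered_alt
  dsimp only
  rw [fold_FFF, altGo_eq]
  simp only [List.any_nil, Bool.false_and, Bool.false_or]
  rw [← staged_eq (fun b => decide (b.2.1 > r - v))
        (fun x => decide (x.1 ≤ tol) && decide (x.2.1 ≥ t - tol))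
        (fun c => decide (c.1 < w)) (PySem.List.sorted aligns (fun a => a.2.2.1))]
  cases h1 : searchPast (fun x => decide (x.2.1 > r - v)) (PySem.List.sorted aligns (fun a => a.2.2.1)) with
  | none => rfl
  | some r1 =>
    dsimp only
    rw [fold_TFF]
    cases h2 : searchPast (fun x => decide (x.1 ≤ tol) && decide (x.2.1 ≥ t - tol)) r1 with
    | none => rfl
    | some r2 => simp
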